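-- pv_equiv track=rewrite | github.com/ThomSab/Magic_Man | magic_man_diagnostics.py | hidden_node_grade
-- ===== SOURCE A (Python) =====
-- def hidden_node_grade(self_node,in_edges_dict,grade_dict,hidden):
--     #where to place the hidden node in the graph plot
--
--     if not grade_dict[self_node] == None:
--         return grade_dict[self_node]
--
--     #is the input node is on the end of an edge from another hidden node?
--     hidden_in_nodes=[node for node in [item[0] for item in in_edges_dict[self_node]] if node in list(hidden)]
--     if hidden_in_nodes:
--         highest_input_grade = max([hidden_node_grade(hidden_in_node,in_edges_dict,grade_dict,hidden) for hidden_in_node in hidden_in_nodes])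
--         self_grade=highest_input_grade+1
--     else:
--         self_grade = 0
--
--     grade_dict[self_node]=self_grade
--     return self_grade
-- ===== SOURCE B (Python) =====
-- def hidden_node_grade(self_node, in_edges_dict, grade_dict, hidden):
--     # Iterative two-phase version (no recursion): collect, by fixed-point
--     # closure, exactly the ungraded nodes self_node's grade depends on, then
--     # grade them by rounds of relaxation.  Mutates grade_dict like the
--     # original (same entries, possibly written in a different order).
--     if grade_dict[self_node] is not None:
--         return grade_dict[self_node]
--     hidden_set = set(hidden)
--     relevant = [self_node]
--     for _ in range(len(hidden) + 1):
--         for v in list(relevant):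
--             for u, _ in in_edges_dict[v]:
--                 if u in hidden_set and grade_dict[u] is None and u not in relevant:
--                     relevant.append(u)
--     for _ in range(len(relevant)):
--         for v in relevant:
--             if grade_dict[v] is None:
--                 preds = [u for u, _ in in_edges_dict[v] if u in hidden_set]
--                 if all(grade_dict[u] is not None for u in preds):
--                     grade_dict[v] = max((grade_dict[u] for u in preds), default=-1) + 1
--     return grade_dict[self_node]
-- ===== Notes on version B (the rewrite author's own statement) =====
-- stated objective: alternative
-- what changed: Replaced the memoized depth-first recursion by an iterative two-phase computation: first collect, by fixed-point closure, exactly the ungraded nodes self_node's grade depends on, then grade them all by rounds of relaxation.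
import Mathlib
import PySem

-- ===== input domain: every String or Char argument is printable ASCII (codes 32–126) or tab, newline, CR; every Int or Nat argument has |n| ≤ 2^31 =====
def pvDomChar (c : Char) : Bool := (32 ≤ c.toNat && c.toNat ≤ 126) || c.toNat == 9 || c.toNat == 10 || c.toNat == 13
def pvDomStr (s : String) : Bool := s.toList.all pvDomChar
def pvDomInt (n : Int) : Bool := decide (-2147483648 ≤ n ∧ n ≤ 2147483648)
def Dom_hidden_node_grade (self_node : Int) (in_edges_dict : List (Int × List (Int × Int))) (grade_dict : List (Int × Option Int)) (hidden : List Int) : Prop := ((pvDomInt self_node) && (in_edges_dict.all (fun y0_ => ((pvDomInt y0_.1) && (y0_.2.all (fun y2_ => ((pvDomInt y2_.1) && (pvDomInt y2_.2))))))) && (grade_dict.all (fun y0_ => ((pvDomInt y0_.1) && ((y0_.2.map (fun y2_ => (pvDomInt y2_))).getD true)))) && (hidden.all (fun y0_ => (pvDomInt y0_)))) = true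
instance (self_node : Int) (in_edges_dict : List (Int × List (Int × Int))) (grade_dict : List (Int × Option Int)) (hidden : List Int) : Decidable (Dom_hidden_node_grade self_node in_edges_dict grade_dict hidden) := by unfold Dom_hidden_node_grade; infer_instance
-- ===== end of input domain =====

-- B replaces A's memoized DFS recursion by an iterative two-phase computation: collect the
-- relevant ungraded nodes by fixed-point closure, then grade them by rounds of relaxation
-- (objective: alternative, not faster). Both Pythons mutate grade_dict in place with the same
-- final entries (possibly written in a different order); the equivalence proved here is about
-- the RETURN value only.

-- ===== PORT A =====
-- memoized recursion of Source A; the dict is threaded through the fold exactly as Python mutates it;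
-- fuel (grade_dict.length + 1) only makes the recursion total — under Pre_ it is never exhausted
def pvACore (E : PySem.Dict Int (List (Int × Int))) (hidden : List Int) :
    Nat → Int → PySem.Dict Int (Option Int) → Int × PySem.Dict Int (Option Int)
  | 0, _, d => (0, d)
  | f+1, v, d =>
    match (d.get? v).getD none with
    | some x => (x, d)                 -- if not grade_dict[self_node] == None: return it
    | none =>
      -- hidden_in_nodes = [node for node in [item[0] for item in in_edges_dict[v]] if node in hidden]
      let hins := (((E.get? v).getD []).map Prod.fst).filter (fun u => hidden.contains u)
      let r :=
        if hins = [] then ((0 : Int), d)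
        else
          let p := hins.foldl (fun acc u =>
            let c := pvACore E hidden f u acc.2
            (acc.1 ++ [c.1], c.2)) (([] : List Int), d)
          ((PySem.List.max? p.1 (fun x => x)).getD 0 + 1, p.2)
      (r.1, r.2.insert v (some r.1))   -- grade_dict[self_node] = self_grade; return self_grade

def hidden_node_grade (self_node : Int) (in_edges_dict : List (Int × List (Int × Int))) (grade_dict : List (Int × Option Int)) (hidden : List Int) : Int :=
  (pvACore (PySem.Dict.mk in_edges_dict) hidden (grade_dict.length + 1) self_node (PySem.Dict.mk grade_dict)).1

-- ===== PORT B =====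
-- inner loop of Source B's closure phase: append the fresh ungraded hidden predecessors read off one edge list
def pvInner (hs : PySem.Set Int) (gd : PySem.Dict Int (Option Int))
    (ps : List (Int × Int)) (acc : List Int) : List Int :=
  ps.foldl (fun a p =>
    if PySem.Set.contains hs p.1 && ((gd.get? p.1).getD none).isNone && !(a.contains p.1)
    then a ++ [p.1] else a) acc

-- one round of Source B's closure loop (iterates the snapshot R, appending to the live list)
def pvGrowB (E : PySem.Dict Int (List (Int × Int))) (hs : PySem.Set Int)
    (gd : PySem.Dict Int (Option Int)) (R : List Int) : List Int :=
  R.foldl (fun acc v => pvInner hs gd ((E.get? v).getD []) acc) R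

-- one relaxation step of Source B's grading loop body
def pvRelax (E : PySem.Dict Int (List (Int × Int))) (hs : PySem.Set Int)
    (d : PySem.Dict Int (Option Int)) (w : Int) : PySem.Dict Int (Option Int) :=
  match (d.get? w).getD none with
  | some _ => d                        -- if grade_dict[v] is not None: skip
  | none =>
    let preds := (((E.get? w).getD []).map Prod.fst).filter (fun u => PySem.Set.contains hs u)
    if preds.all (fun u => ((d.get? u).getD none).isSome) then
      d.insert w (some ((PySem.List.max? (preds.map (fun u => ((d.get? u).getD none).getD 0)) (fun x => x)).getD (-1) + 1))
    else d

def hidden_node_grade_alt (self_node : Int) (in_edges_dict : List (Int × List (Int × Int))) (grade_dict : List (Int × Option Int)) (hidden : List Int) : Int :=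
  let gd := PySem.Dict.mk grade_dict
  match (gd.get? self_node).getD none with
  | some x => x
  | none =>
    let Ed := PySem.Dict.mk in_edges_dict
    let hs := PySem.Set.ofList hidden
    let relevant := (PySem.List.pyRange 0 ((hidden.length : Int) + 1) 1).foldl
      (fun R _ => pvGrowB Ed hs gd R) [self_node]
    let final := (PySem.List.pyRange 0 (relevant.length : Int) 1).foldl
      (fun d _ => relevant.foldl (pvRelax Ed hs) d) gd
    ((final.get? self_node).getD none).getD 0

-- ===== PRECONDITION & SPEC =====
-- hidden in-predecessors of v (the list A's comprehension builds)
def pvPredsOf (E : PySem.Dict Int (List (Int × Int))) (hidden : List Int) (v : Int) : List Int :=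
  (((E.get? v).getD []).map Prod.fst).filter (fun u => hidden.contains u)

-- the still-ungraded hidden in-predecessors of v: exactly the nodes A recurses into from v
def pvPNOf (gd : PySem.Dict Int (Option Int)) (E : PySem.Dict Int (List (Int × Int)))
    (hidden : List Int) (v : Int) : List Int :=
  (pvPredsOf E hidden v).filter (fun u => ((gd.get? u).getD none).isNone)

-- one step of the predecessor closure: S together with all P-predecessors of members of S
def pvStep (P : Int → List Int) (S : Finset Int) : Finset Int :=
  S ∪ S.biUnion (fun v => (P v).toFinset)

-- all strict P-ancestors of v (the iteration count only guarantees the closure has stabilised)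
def pvAnc (P : Int → List Int) (H : List Int) (v : Int) : Finset Int :=
  (pvStep P)^[(P v).length + H.length + 1] (P v).toFinset

-- v together with all its P-ancestors: exactly the nodes A's recursion from v visits
def pvReach (P : Int → List Int) (H : List Int) (s : Int) : Finset Int :=
  (pvStep P)^[H.length + 1] {s}

-- Pre_ excludes exactly the inputs on which A raises: self_node missing from grade_dict
-- (KeyError), or — when grade_dict[self_node] is None — a node A's recursion reaches that is
-- missing from grade_dict or in_edges_dict (KeyError), or a reachable cyclic
-- hidden-predecessor chain (RecursionError).
def Pre_hidden_node_grade (self_node : Int) (in_edges_dict : List (Int × List (Int × Int))) (grade_dict : List (Int × Option Int)) (hidden : List Int) : Prop :=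
  ((PySem.Dict.mk grade_dict).get? self_node).isSome ∧
  ((PySem.Dict.mk grade_dict).get? self_node = some none →
    ∀ v ∈ pvReach (pvPNOf (PySem.Dict.mk grade_dict) (PySem.Dict.mk in_edges_dict) hidden) hidden self_node,
      ((PySem.Dict.mk grade_dict).get? v).isSome ∧
      ((PySem.Dict.mk in_edges_dict).get? v).isSome ∧
      v ∉ pvAnc (pvPNOf (PySem.Dict.mk grade_dict) (PySem.Dict.mk in_edges_dict) hidden) hidden v)
instance (self_node : Int) (in_edges_dict : List (Int × List (Int × Int))) (grade_dict : List (Int × Option Int)) (hidden : List Int) : Decidable (Pre_hidden_node_grade self_node in_edges_dict grade_dict hidden) := by unfold Pre_hidden_node_grade; infer_instance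

def pvWitness_hidden_node_grade : Int × (List (Int × List (Int × Int))) × (List (Int × Option Int)) × List Int :=
  (1, [(1, [(2, 7)]), (2, [])], [(1, none), (2, none)], [2])

def Spec_hidden_node_grade (self_node : Int) (in_edges_dict : List (Int × List (Int × Int))) (grade_dict : List (Int × Option Int)) (hidden : List Int) (out : Int) : Prop := out = hidden_node_grade_alt self_node in_edges_dict grade_dict hidden
instance (self_node : Int) (in_edges_dict : List (Int × List (Int × Int))) (grade_dict : List (Int × Option Int)) (hidden : List Int) (out : Int) : Decidable (Spec_hidden_node_grade self_node in_edges_dict grade_dict hidden out) := by unfold Spec_hidden_node_grade; infer_instance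

-- ===== CLAIM (what is proved, stated in full; the proofs are below) =====
def Claim_equal_hidden_node_grade : Prop := ∀ (self_node : Int) (in_edges_dict : List (Int × List (Int × Int))) (grade_dict : List (Int × Option Int)) (hidden : List Int), Dom_hidden_node_grade self_node in_edges_dict grade_dict hidden → Pre_hidden_node_grade self_node in_edges_dict grade_dict hidden → Spec_hidden_node_grade self_node in_edges_dict grade_dict hidden (hidden_node_grade self_node in_edges_dict grade_dict hidden)

-- ===== LEMMAS AND PROOFS =====

-- ---- closure lemmas ----
theorem pvStep_subset_left (P : Int → List Int) (S : Finset Int) : S ⊆ pvStep P S :=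
  Finset.subset_union_left

theorem pvStep_mono (P : Int → List Int) {S T : Finset Int} (h : S ⊆ T) :
    pvStep P S ⊆ pvStep P T :=
  Finset.union_subset_union h (Finset.biUnion_subset_biUnion_of_subset_left _ h)

theorem pvIter_subset_closed (P : Int → List Int) {S T : Finset Int}
    (hS : S ⊆ T) (hT : pvStep P T ⊆ T) : ∀ k, (pvStep P)^[k] S ⊆ T := by
  intro k
  induction k with
  | zero => simpa using hS
  | succ k ih =>
    rw [Function.iterate_succ_apply']
    exact (pvStep_mono P ih).trans hT

theorem pvIter_chain (P : Int → List Int) (S : Finset Int) (k : Nat) :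
    (pvStep P)^[k] S ⊆ (pvStep P)^[k+1] S := by
  rw [Function.iterate_succ_apply']
  exact pvStep_subset_left P _

theorem pvSubset_iter (P : Int → List Int) (S : Finset Int) (k : Nat) :
    S ⊆ (pvStep P)^[k] S := by
  induction k with
  | zero => simp
  | succ k ih => exact ih.trans (pvIter_chain P S k)

theorem pvSubset_pvAnc (P : Int → List Int) (H : List Int) (v : Int) :
    (P v).toFinset ⊆ pvAnc P H v := pvSubset_iter P _ _

theorem pvIter_bound (P : Int → List Int) (H : List Int)
    (hP : ∀ u, ∀ x ∈ P u, x ∈ H) (S : Finset Int) (k : Nat) :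
    (pvStep P)^[k] S ⊆ S ∪ H.toFinset := by
  induction k with
  | zero => simp
  | succ k ih =>
    rw [Function.iterate_succ_apply']
    intro x hx
    rcases Finset.mem_union.1 hx with hx | hx
    · exact ih hx
    · rcases Finset.mem_biUnion.1 hx with ⟨u, _, hxu⟩
      exact Finset.mem_union_right _ (List.mem_toFinset.2 (hP u x (List.mem_toFinset.1 hxu)))

theorem pvIterN_fix (P : Int → List Int) (H : List Int)
    (hP : ∀ u, ∀ x ∈ P u, x ∈ H) (S0 : Finset Int) (N : Nat) (hNlt : H.length < N) :
    pvStep P ((pvStep P)^[N] S0) = (pvStep P)^[N] S0 := by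
  have hfix : ∃ k < N, pvStep P ((pvStep P)^[k] S0) = (pvStep P)^[k] S0 := by
    by_contra hcon
    push Not at hcon
    have hgrow : ∀ k ≤ N, S0.card + k ≤ ((pvStep P)^[k] S0).card := by
      intro k hk
      induction k with
      | zero => simp
      | succ k ih =>
        have hk' : k ≤ N := Nat.le_of_succ_le hk
        have h1 : ((pvStep P)^[k] S0).card < ((pvStep P)^[k+1] S0).card := by
          apply Finset.card_lt_card
          refine ⟨pvIter_chain P S0 k, ?_⟩
          intro hsub
          have heq : (pvStep P)^[k+1] S0 = (pvStep P)^[k] S0 :=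
            Finset.Subset.antisymm hsub (pvIter_chain P S0 k)
          have h2 := hcon k (Nat.lt_of_succ_le hk)
          rw [Function.iterate_succ_apply'] at heq
          exact h2 heq
        have := ih hk'
        omega
    have hub : ((pvStep P)^[N] S0).card ≤ S0.card + H.toFinset.card := by
      calc ((pvStep P)^[N] S0).card ≤ (S0 ∪ H.toFinset).card :=
            Finset.card_le_card (pvIter_bound P H hP S0 N)
        _ ≤ S0.card + H.toFinset.card := Finset.card_union_le _ _
    have h0 := hgrow N le_rfl
    have hc2 : H.toFinset.card ≤ H.length := List.toFinset_card_le _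
    omega
  rcases hfix with ⟨k, hkN, hfk⟩
  have hrest : (pvStep P)^[N] S0 = (pvStep P)^[k] S0 := by
    have h3 : (pvStep P)^[N] S0 = (pvStep P)^[N - k] ((pvStep P)^[k] S0) := by
      rw [← Function.iterate_add_apply]
      congr 1
      omega
    rw [h3, Function.iterate_fixed hfk]
  rw [hrest, hfk]

theorem pvAnc_fix (P : Int → List Int) (H : List Int)
    (hP : ∀ u, ∀ x ∈ P u, x ∈ H) (v : Int) :
    pvStep P (pvAnc P H v) = pvAnc P H v :=
  pvIterN_fix P H hP (P v).toFinset ((P v).length + H.length + 1) (by omega)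

theorem pvReach_fix (P : Int → List Int) (H : List Int)
    (hP : ∀ u, ∀ x ∈ P u, x ∈ H) (s : Int) :
    pvStep P (pvReach P H s) = pvReach P H s :=
  pvIterN_fix P H hP {s} (H.length + 1) (by omega)

theorem pvFix_closed (P : Int → List Int) {S : Finset Int}
    (hfix : pvStep P S = S) {u : Int} (hu : u ∈ S) : (P u).toFinset ⊆ S := by
  have hb : S.biUnion (fun w => (P w).toFinset) ⊆ pvStep P S := Finset.subset_union_right
  rw [hfix] at hb
  exact (Finset.subset_biUnion_of_mem _ hu).trans hb

theorem pvAnc_closed_mem (P : Int → List Int) (H : List Int)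
    (hP : ∀ u, ∀ x ∈ P u, x ∈ H) {v u : Int} (hu : u ∈ pvAnc P H v) :
    (P u).toFinset ⊆ pvAnc P H v :=
  pvFix_closed P (pvAnc_fix P H hP v) hu

theorem pvAnc_subset' (P : Int → List Int) (H : List Int) (v : Int) {T : Finset Int}
    (h0 : (P v).toFinset ⊆ T) (hT : pvStep P T ⊆ T) : pvAnc P H v ⊆ T :=
  pvIter_subset_closed P h0 hT _

theorem pvAnc_trans (P : Int → List Int) (H : List Int)
    (hP : ∀ u, ∀ x ∈ P u, x ∈ H) {v u : Int} (hu : u ∈ pvAnc P H v) :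
    pvAnc P H u ⊆ pvAnc P H v :=
  pvAnc_subset' P H u (pvAnc_closed_mem P H hP hu) (le_of_eq (pvAnc_fix P H hP v))

theorem pvRank_lt' (P : Int → List Int) (H : List Int)
    (hP : ∀ u, ∀ x ∈ P u, x ∈ H) {v u : Int} (hu : u ∈ P v)
    (hacu : u ∉ pvAnc P H u) : (pvAnc P H u).card < (pvAnc P H v).card := by
  have humem : u ∈ pvAnc P H v := pvSubset_pvAnc P H v (List.mem_toFinset.2 hu)
  apply Finset.card_lt_card
  exact ⟨pvAnc_trans P H hP humem, fun hsub => hacu (hsub humem)⟩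

theorem pvSelf_mem_reach (P : Int → List Int) (H : List Int) (s : Int) :
    s ∈ pvReach P H s :=
  pvSubset_iter P {s} (H.length + 1) (Finset.mem_singleton_self s)

theorem pvReach_closed (P : Int → List Int) (H : List Int)
    (hP : ∀ u, ∀ x ∈ P u, x ∈ H) (s : Int) {v : Int} (hv : v ∈ pvReach P H s) :
    (P v).toFinset ⊆ pvReach P H s :=
  pvFix_closed P (pvReach_fix P H hP s) hv

theorem pvAnc_subset_reach (P : Int → List Int) (H : List Int)
    (hP : ∀ u, ∀ x ∈ P u, x ∈ H) (s : Int) :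
    pvAnc P H s ⊆ pvReach P H s :=
  pvIter_subset_closed P (pvReach_closed P H hP s (pvSelf_mem_reach P H s))
    (le_of_eq (pvReach_fix P H hP s)) _

theorem pvIter_tag (P : Int → List Int) (Q : Int → Prop)
    (hQ : ∀ u, ∀ x ∈ P u, Q x) (s : Int) :
    ∀ k, ∀ w ∈ (pvStep P)^[k] {s}, w = s ∨ Q w := by
  intro k
  induction k with
  | zero => simp
  | succ k ih =>
    rw [Function.iterate_succ_apply']
    intro w hw
    rcases Finset.mem_union.1 hw with h | h
    · exact ih w h
    · rcases Finset.mem_biUnion.1 h with ⟨u, _, hx⟩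
      exact Or.inr (hQ u w (List.mem_toFinset.1 hx))

-- ---- the common specification value: the pure grade of a node ----
def pvRankN (gd : PySem.Dict Int (Option Int)) (E : PySem.Dict Int (List (Int × Int)))
    (hidden : List Int) (v : Int) : Nat :=
  (pvAnc (pvPNOf gd E hidden) hidden v).card

def pvVal (gd : PySem.Dict Int (Option Int)) (E : PySem.Dict Int (List (Int × Int)))
    (hidden : List Int) : Nat → Int → Int
  | 0, _ => 0
  | f+1, v =>
    match (gd.get? v).getD none with
    | some x => x
    | none =>
      let ps := pvPredsOf E hidden v
      if ps = [] then 0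
      else (PySem.List.max? (ps.map (pvVal gd E hidden f)) (fun x => x)).getD 0 + 1

def pvPV (gd : PySem.Dict Int (Option Int)) (E : PySem.Dict Int (List (Int × Int)))
    (hidden : List Int) (v : Int) : Int :=
  pvVal gd E hidden (pvRankN gd E hidden v + 2) v

theorem pvP_mem_hidden (E : PySem.Dict Int (List (Int × Int))) (hidden : List Int) :
    ∀ v, ∀ x ∈ pvPredsOf E hidden v, x ∈ hidden := by
  intro v x hx
  simp only [pvPredsOf, List.mem_filter] at hx
  exact List.contains_iff_mem.1 hx.2

theorem pvPN_sub (gd : PySem.Dict Int (Option Int)) (E : PySem.Dict Int (List (Int × Int)))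
    (hidden : List Int) : ∀ w, ∀ x ∈ pvPNOf gd E hidden w, x ∈ pvPredsOf E hidden w := by
  intro w x hx
  exact (List.mem_filter.1 hx).1

theorem pvPN_mem_hidden (gd : PySem.Dict Int (Option Int)) (E : PySem.Dict Int (List (Int × Int)))
    (hidden : List Int) : ∀ w, ∀ x ∈ pvPNOf gd E hidden w, x ∈ hidden := by
  intro w x hx
  exact pvP_mem_hidden E hidden w x (pvPN_sub gd E hidden w x hx)

theorem pvPN_none (gd : PySem.Dict Int (Option Int)) (E : PySem.Dict Int (List (Int × Int)))
    (hidden : List Int) : ∀ w, ∀ x ∈ pvPNOf gd E hidden w, (gd.get? x).getD none = none := by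
  intro w x hx
  have := (List.mem_filter.1 hx).2
  simpa [Option.isNone_iff_eq_none] using this

theorem pvVal_computed (gd : PySem.Dict Int (Option Int)) (E : PySem.Dict Int (List (Int × Int)))
    (hidden : List Int) (v x : Int) (f : Nat) (h : (gd.get? v).getD none = some x) :
    pvVal gd E hidden (f+1) v = x := by
  simp [pvVal, h]

theorem pvPV_computed (gd : PySem.Dict Int (Option Int)) (E : PySem.Dict Int (List (Int × Int)))
    (hidden : List Int) (v x : Int) (h : (gd.get? v).getD none = some x) :
    pvPV gd E hidden v = x :=
  pvVal_computed gd E hidden v x _ h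

theorem pvVal_succ_none (gd : PySem.Dict Int (Option Int)) (E : PySem.Dict Int (List (Int × Int)))
    (hidden : List Int) (v : Int) (f : Nat) (hdv : (gd.get? v).getD none = none) :
    pvVal gd E hidden (f+1) v =
      if pvPredsOf E hidden v = [] then 0
      else (PySem.List.max? ((pvPredsOf E hidden v).map (pvVal gd E hidden f)) (fun x => x)).getD 0 + 1 := by
  simp only [pvVal, hdv]

theorem pvRankN_lt (gd : PySem.Dict Int (Option Int)) (E : PySem.Dict Int (List (Int × Int)))
    (hidden : List Int) {v u : Int} (hu : u ∈ pvPNOf gd E hidden v)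
    (hacu : u ∉ pvAnc (pvPNOf gd E hidden) hidden u) :
    pvRankN gd E hidden u < pvRankN gd E hidden v :=
  pvRank_lt' (pvPNOf gd E hidden) hidden (pvPN_mem_hidden gd E hidden) hu hacu

theorem pvVal_stable (gd : PySem.Dict Int (Option Int)) (E : PySem.Dict Int (List (Int × Int)))
    (hidden : List Int) (R : Finset Int)
    (hclosed : ∀ v ∈ R, ∀ u ∈ pvPNOf gd E hidden v, u ∈ R)
    (hacyc : ∀ v ∈ R, v ∉ pvAnc (pvPNOf gd E hidden) hidden v) :
    ∀ n v, v ∈ R → pvRankN gd E hidden v = n →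
    ∀ f g, pvRankN gd E hidden v + 2 ≤ f → pvRankN gd E hidden v + 2 ≤ g →
    pvVal gd E hidden f v = pvVal gd E hidden g v := by
  intro n
  induction n using Nat.strong_induction_on with
  | _ n ih =>
    intro v hvR hn f g hf hg
    obtain ⟨f', rfl⟩ : ∃ f', f = f' + 1 := ⟨f - 1, by omega⟩
    obtain ⟨g', rfl⟩ : ∃ g', g = g' + 1 := ⟨g - 1, by omega⟩
    cases hdv : (gd.get? v).getD none with
    | some x => rw [pvVal_computed gd E hidden v x f' hdv, pvVal_computed gd E hidden v x g' hdv]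
    | none =>
      rw [pvVal_succ_none gd E hidden v f' hdv, pvVal_succ_none gd E hidden v g' hdv]
      have hmap : (pvPredsOf E hidden v).map (pvVal gd E hidden f')
          = (pvPredsOf E hidden v).map (pvVal gd E hidden g') := by
        apply List.map_congr_left
        intro u hu
        cases hdu : (gd.get? u).getD none with
        | some x =>
          obtain ⟨f'', rfl⟩ : ∃ f'', f' = f'' + 1 := ⟨f' - 1, by omega⟩
          obtain ⟨g'', rfl⟩ : ∃ g'', g' = g'' + 1 := ⟨g' - 1, by omega⟩
          rw [pvVal_computed gd E hidden u x f'' hdu, pvVal_computed gd E hidden u x g'' hdu]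
        | none =>
          have huN : u ∈ pvPNOf gd E hidden v := by
            simp only [pvPNOf, List.mem_filter]
            exact ⟨hu, by simp [hdu]⟩
          have huR : u ∈ R := hclosed v hvR u huN
          have hlt : pvRankN gd E hidden u < pvRankN gd E hidden v :=
            pvRankN_lt gd E hidden huN (hacyc u huR)
          exact ih (pvRankN gd E hidden u) (by omega) u huR rfl f' g' (by omega) (by omega)
      rw [hmap]

theorem pvVal_eq_pvPV (gd : PySem.Dict Int (Option Int)) (E : PySem.Dict Int (List (Int × Int)))
    (hidden : List Int) (R : Finset Int)
    (hclosed : ∀ v ∈ R, ∀ u ∈ pvPNOf gd E hidden v, u ∈ R)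
    (hacyc : ∀ v ∈ R, v ∉ pvAnc (pvPNOf gd E hidden) hidden v)
    {v : Int} (hvR : v ∈ R) (f : Nat) (hf : pvRankN gd E hidden v + 2 ≤ f) :
    pvVal gd E hidden f v = pvPV gd E hidden v :=
  pvVal_stable gd E hidden R hclosed hacyc _ v hvR rfl f _ hf le_rfl

-- the defining fixed-point equation of pvPV on an acyclic input
theorem pvPV_unfold (gd : PySem.Dict Int (Option Int)) (E : PySem.Dict Int (List (Int × Int)))
    (hidden : List Int) (R : Finset Int)
    (hclosed : ∀ v ∈ R, ∀ u ∈ pvPNOf gd E hidden v, u ∈ R)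
    (hacyc : ∀ v ∈ R, v ∉ pvAnc (pvPNOf gd E hidden) hidden v)
    {v : Int} (hvR : v ∈ R) (hdv : (gd.get? v).getD none = none) :
    pvPV gd E hidden v =
      if pvPredsOf E hidden v = [] then 0
      else (PySem.List.max? ((pvPredsOf E hidden v).map (pvPV gd E hidden)) (fun x => x)).getD 0 + 1 := by
  show pvVal gd E hidden (pvRankN gd E hidden v + 1 + 1) v = _
  rw [pvVal_succ_none gd E hidden v (pvRankN gd E hidden v + 1) hdv]
  have hmap : (pvPredsOf E hidden v).map (pvVal gd E hidden (pvRankN gd E hidden v + 1))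
      = (pvPredsOf E hidden v).map (pvPV gd E hidden) := by
    apply List.map_congr_left
    intro u hu
    cases hdu : (gd.get? u).getD none with
    | some x =>
      rw [pvVal_computed gd E hidden u x _ hdu, pvPV_computed gd E hidden u x hdu]
    | none =>
      have huN : u ∈ pvPNOf gd E hidden v := by
        simp only [pvPNOf, List.mem_filter]
        exact ⟨hu, by simp [hdu]⟩
      have huR : u ∈ R := hclosed v hvR u huN
      have hlt : pvRankN gd E hidden u < pvRankN gd E hidden v :=
        pvRankN_lt gd E hidden huN (hacyc u huR)
      exact pvVal_eq_pvPV gd E hidden R hclosed hacyc huR _ (by omega)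
  rw [hmap]

-- ---- the shared dict invariant: entries are either untouched or correctly memoised ----
def pvInv (gd : PySem.Dict Int (Option Int)) (E : PySem.Dict Int (List (Int × Int)))
    (hidden : List Int) (R : Finset Int) (d : PySem.Dict Int (Option Int)) : Prop :=
  ∀ w : Int, d.get? w = gd.get? w ∨
    (gd.get? w = some none ∧ w ∈ R ∧ d.get? w = some (some (pvPV gd E hidden w)))

theorem pvInv_init (gd : PySem.Dict Int (Option Int)) (E : PySem.Dict Int (List (Int × Int)))
    (hidden : List Int) (R : Finset Int) : pvInv gd E hidden R gd :=
  fun _ => Or.inl rfl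

theorem pvInv_some (gd : PySem.Dict Int (Option Int)) (E : PySem.Dict Int (List (Int × Int)))
    (hidden : List Int) (R : Finset Int) {d : PySem.Dict Int (Option Int)}
    (hinv : pvInv gd E hidden R d) {u x : Int} (hx : (d.get? u).getD none = some x) :
    pvPV gd E hidden u = x := by
  rcases hinv u with h | ⟨_, _, h⟩
  · rw [h] at hx
    exact pvPV_computed gd E hidden u x hx
  · rw [h] at hx
    simp at hx
    exact hx

theorem pvInv_none (gd : PySem.Dict Int (Option Int)) (E : PySem.Dict Int (List (Int × Int)))
    (hidden : List Int) (R : Finset Int) {d : PySem.Dict Int (Option Int)}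
    (hinv : pvInv gd E hidden R d) {u : Int} (hu : (d.get? u).getD none = none) :
    (gd.get? u).getD none = none := by
  rcases hinv u with h | ⟨_, _, h⟩
  · rw [h] at hu
    exact hu
  · rw [h] at hu
    simp at hu

theorem pvInv_computed_of_gd (gd : PySem.Dict Int (Option Int)) (E : PySem.Dict Int (List (Int × Int)))
    (hidden : List Int) (R : Finset Int) {d : PySem.Dict Int (Option Int)}
    (hinv : pvInv gd E hidden R d) {u x : Int} (hx : (gd.get? u).getD none = some x) :
    (d.get? u).getD none = some x := by
  rcases hinv u with h | ⟨hg, _, h⟩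
  · rw [h]
    exact hx
  · rw [hg] at hx
    simp at hx

theorem pvInv_insert' (gd : PySem.Dict Int (Option Int)) (E : PySem.Dict Int (List (Int × Int)))
    (hidden : List Int) (R : Finset Int) {d : PySem.Dict Int (Option Int)}
    (hinv : pvInv gd E hidden R d) {v : Int}
    (hg : gd.get? v = some none) (hv : v ∈ R)
    (y : Int) (hy : y = pvPV gd E hidden v) :
    pvInv gd E hidden R (d.insert v (some y)) := by
  subst hy
  intro w
  rw [PySem.Dict.get?_insert]
  by_cases hwv : w = v
  · subst hwv
    exact Or.inr ⟨hg, hv, by simp⟩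
  · rw [if_neg hwv]
    exact hinv w

-- ---- port A computes pvPV ----
theorem pvPredsOf_def (E : PySem.Dict Int (List (Int × Int))) (hidden : List Int) (v : Int) :
    List.filter (fun u => hidden.contains u) (List.map Prod.fst ((E.get? v).getD []))
      = pvPredsOf E hidden v := rfl

theorem pvAFold (E : PySem.Dict Int (List (Int × Int))) (hidden : List Int) (f : Nat)
    (F : Int → Int) (Q : PySem.Dict Int (Option Int) → Prop) :
    ∀ (l : List Int),
      (∀ u ∈ l, ∀ d, Q d → (pvACore E hidden f u d).1 = F u ∧ Q (pvACore E hidden f u d).2) →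
      ∀ (acc : List Int) (d : PySem.Dict Int (Option Int)), Q d →
      (l.foldl (fun acc u =>
          (acc.1 ++ [(pvACore E hidden f u acc.2).1], (pvACore E hidden f u acc.2).2)) (acc, d)).1
        = acc ++ l.map F ∧
      Q (l.foldl (fun acc u =>
          (acc.1 ++ [(pvACore E hidden f u acc.2).1], (pvACore E hidden f u acc.2).2)) (acc, d)).2 := by
  intro l
  induction l with
  | nil => intro _ acc d hd; simpa using hd
  | cons u t ih =>
    intro hstep acc d hd
    have hu := hstep u (by simp) d hd
    have ih' := ih (fun u' hu' d' hd' => hstep u' (by simp [hu']) d' hd')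
      (acc ++ [F u]) (pvACore E hidden f u d).2 hu.2
    simp only [List.foldl_cons, hu.1]
    constructor
    · rw [ih'.1]
      simp
    · exact ih'.2

theorem pvACore_correct (gd : PySem.Dict Int (Option Int)) (E : PySem.Dict Int (List (Int × Int)))
    (hidden : List Int) (R : Finset Int)
    (hclosed : ∀ v ∈ R, ∀ u ∈ pvPNOf gd E hidden v, u ∈ R)
    (hacyc : ∀ v ∈ R, v ∉ pvAnc (pvPNOf gd E hidden) hidden v)
    (hkeys : ∀ u ∈ R, (gd.get? u).isSome) :
    ∀ n v f d, pvRankN gd E hidden v = n → v ∈ R →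
      pvInv gd E hidden R d → n + 2 ≤ f →
      (pvACore E hidden f v d).1 = pvPV gd E hidden v ∧
      pvInv gd E hidden R (pvACore E hidden f v d).2 := by
  intro n
  induction n using Nat.strong_induction_on with
  | _ n ih =>
    intro v f d hn hv hinv hf
    obtain ⟨f', rfl⟩ : ∃ f', f = f' + 1 := ⟨f - 1, by omega⟩
    cases hdv : (d.get? v).getD none with
    | some x =>
      simp only [pvACore, hdv]
      exact ⟨(pvInv_some gd E hidden R hinv hdv).symm, hinv⟩
    | none =>
      have hgdv : (gd.get? v).getD none = none := pvInv_none gd E hidden R hinv hdv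
      have hgv : gd.get? v = some none := by
        have hsome := hkeys v hv
        cases hq : gd.get? v with
        | none => rw [hq] at hsome; simp at hsome
        | some o =>
          cases o with
          | none => rfl
          | some y => rw [hq] at hgdv; simp at hgdv
      have hstep : ∀ u ∈ pvPredsOf E hidden v, ∀ d',
          pvInv gd E hidden R d' →
          (pvACore E hidden f' u d').1 = pvPV gd E hidden u ∧
          pvInv gd E hidden R (pvACore E hidden f' u d').2 := by
        intro u hu d' hd'
        cases hdu : (d'.get? u).getD none with
        | some x =>
          obtain ⟨f'', rfl⟩ : ∃ f'', f' = f'' + 1 := ⟨f' - 1, by omega⟩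
          simp only [pvACore, hdu]
          exact ⟨(pvInv_some gd E hidden R hd' hdu).symm, hd'⟩
        | none =>
          have hgdu : (gd.get? u).getD none = none := pvInv_none gd E hidden R hd' hdu
          have huN : u ∈ pvPNOf gd E hidden v := by
            simp only [pvPNOf, List.mem_filter]
            exact ⟨hu, by simp [hgdu]⟩
          have huR : u ∈ R := hclosed v hv u huN
          have hlt : pvRankN gd E hidden u < pvRankN gd E hidden v :=
            pvRankN_lt gd E hidden huN (hacyc u huR)
          exact ih (pvRankN gd E hidden u) (by omega) u f' d' rfl huR hd' (by omega)
      have hfold := pvAFold E hidden f' (pvPV gd E hidden)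
        (pvInv gd E hidden R) (pvPredsOf E hidden v) hstep [] d hinv
      simp only [pvACore, hdv]
      rw [pvPredsOf_def]
      by_cases hps : pvPredsOf E hidden v = []
      · rw [if_pos hps]
        have hvv : pvPV gd E hidden v = 0 := by
          rw [pvPV_unfold gd E hidden R hclosed hacyc hv hgdv, if_pos hps]
        exact ⟨hvv.symm, pvInv_insert' gd E hidden R hinv hgv hv 0 hvv.symm⟩
      · rw [if_neg hps]
        have hvv : pvPV gd E hidden v
            = (PySem.List.max? ((pvPredsOf E hidden v).map (pvPV gd E hidden)) (fun x => x)).getD 0 + 1 := by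
          rw [pvPV_unfold gd E hidden R hclosed hacyc hv hgdv, if_neg hps]
        have h1 : (List.foldl (fun acc u =>
            (acc.1 ++ [(pvACore E hidden f' u acc.2).1], (pvACore E hidden f' u acc.2).2))
            ([], d) (pvPredsOf E hidden v)).1
            = List.map (pvPV gd E hidden) (pvPredsOf E hidden v) := by
          simpa using hfold.1
        simp only [h1]
        exact ⟨hvv.symm, pvInv_insert' gd E hidden R hfold.2 hgv hv _ hvv.symm⟩

-- ---- fuel bound for port A and its top-level characterisation ----
theorem pvRank_self_bound (E : PySem.Dict Int (List (Int × Int))) (hidden : List Int)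
    (grade_dict : List (Int × Option Int)) (self : Int)
    (hkeysR : ∀ u ∈ pvReach (pvPNOf (PySem.Dict.mk grade_dict) E hidden) hidden self,
      ((PySem.Dict.mk grade_dict).get? u).isSome)
    (hself : (PySem.Dict.mk grade_dict).get? self = some none)
    (hacs : self ∉ pvAnc (pvPNOf (PySem.Dict.mk grade_dict) E hidden) hidden self) :
    pvRankN (PySem.Dict.mk grade_dict) E hidden self < grade_dict.length := by
  set gd := PySem.Dict.mk grade_dict with hgd
  have hAncR : pvAnc (pvPNOf gd E hidden) hidden self
      ⊆ pvReach (pvPNOf gd E hidden) hidden self :=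
    pvAnc_subset_reach (pvPNOf gd E hidden) hidden (pvPN_mem_hidden gd E hidden) self
  have hkeylen : gd.keys.length = grade_dict.length := by
    show (grade_dict.map Prod.fst).length = grade_dict.length
    exact List.length_map ..
  have hsub : pvAnc (pvPNOf gd E hidden) hidden self ⊆ gd.keys.toFinset.erase self := by
    intro u hu
    rw [Finset.mem_erase]
    constructor
    · intro heq
      exact hacs (heq ▸ hu)
    · have hus : (gd.get? u).isSome := hkeysR u (hAncR hu)
      have hne : gd.get? u ≠ none := by
        intro h; rw [h] at hus; simp at hus
      exact List.mem_toFinset.2 ((not_iff_not.2 (PySem.Dict.get?_eq_none_iff_not_mem_keys gd u)).1 hne |> not_not.1)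
  have hselfK : self ∈ gd.keys.toFinset := by
    have hne : gd.get? self ≠ none := by rw [hself]; simp
    exact List.mem_toFinset.2 ((not_iff_not.2 (PySem.Dict.get?_eq_none_iff_not_mem_keys gd self)).1 hne |> not_not.1)
  have h1 : pvRankN gd E hidden self ≤ (gd.keys.toFinset.erase self).card :=
    Finset.card_le_card hsub
  have h2 : (gd.keys.toFinset.erase self).card = gd.keys.toFinset.card - 1 :=
    Finset.card_erase_of_mem hselfK
  have h3 : gd.keys.toFinset.card ≤ gd.keys.length := List.toFinset_card_le _
  have h4 : 1 ≤ gd.keys.toFinset.card := Finset.card_pos.2 ⟨self, hselfK⟩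
  omega

theorem pvA_top (self_node : Int) (in_edges_dict : List (Int × List (Int × Int)))
    (grade_dict : List (Int × Option Int)) (hidden : List Int)
    (hself : (PySem.Dict.mk grade_dict).get? self_node = some none)
    (hpre : ∀ v ∈ pvReach (pvPNOf (PySem.Dict.mk grade_dict) (PySem.Dict.mk in_edges_dict) hidden) hidden self_node,
      ((PySem.Dict.mk grade_dict).get? v).isSome ∧
      ((PySem.Dict.mk in_edges_dict).get? v).isSome ∧
      v ∉ pvAnc (pvPNOf (PySem.Dict.mk grade_dict) (PySem.Dict.mk in_edges_dict) hidden) hidden v) :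
    hidden_node_grade self_node in_edges_dict grade_dict hidden
      = pvPV (PySem.Dict.mk grade_dict) (PySem.Dict.mk in_edges_dict) hidden self_node := by
  set gd := PySem.Dict.mk grade_dict with hgd
  set E := PySem.Dict.mk in_edges_dict with hE
  set R := pvReach (pvPNOf gd E hidden) hidden self_node with hR
  have hPmem := pvPN_mem_hidden gd E hidden
  have hclosed : ∀ v ∈ R, ∀ u ∈ pvPNOf gd E hidden v, u ∈ R := by
    intro v hv u hu
    exact pvReach_closed (pvPNOf gd E hidden) hidden hPmem self_node hv (List.mem_toFinset.2 hu)
  have hacyc : ∀ v ∈ R, v ∉ pvAnc (pvPNOf gd E hidden) hidden v :=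
    fun v hv => (hpre v hv).2.2
  have hkeys : ∀ v ∈ R, (gd.get? v).isSome := fun v hv => (hpre v hv).1
  have hselfR : self_node ∈ R := pvSelf_mem_reach _ hidden self_node
  have hbound : pvRankN gd E hidden self_node < grade_dict.length :=
    pvRank_self_bound E hidden grade_dict self_node hkeys hself (hacyc self_node hselfR)
  exact (pvACore_correct gd E hidden R hclosed hacyc hkeys
    (pvRankN gd E hidden self_node) self_node (grade_dict.length + 1) gd rfl
    hselfR (pvInv_init gd E hidden R) (by omega)).1

-- ---- port B: the closure phase computes pvReach ----
theorem pvPNOf_mem_iff (gd : PySem.Dict Int (Option Int)) (E : PySem.Dict Int (List (Int × Int)))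
    (hidden : List Int) (v x : Int) :
    x ∈ pvPNOf gd E hidden v ↔
      x ∈ ((E.get? v).getD []).map Prod.fst ∧ hidden.contains x = true ∧
        ((gd.get? x).getD none).isNone = true := by
  simp only [pvPNOf, pvPredsOf, List.mem_filter]
  tauto

theorem pvInner_mem (hidden : List Int) (gd : PySem.Dict Int (Option Int)) :
    ∀ (ps : List (Int × Int)) (acc : List Int) (x : Int),
    x ∈ pvInner (PySem.Set.ofList hidden) gd ps acc ↔
      x ∈ acc ∨ (x ∈ ps.map Prod.fst ∧ hidden.contains x = true ∧
        ((gd.get? x).getD none).isNone = true) := by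
  intro ps
  induction ps with
  | nil => intro acc x; simp [pvInner]
  | cons p t ih =>
    intro acc x
    have hcs : PySem.Set.contains (PySem.Set.ofList hidden) p.1 = hidden.contains p.1 := by
      simp [pysem]
    show x ∈ pvInner (PySem.Set.ofList hidden) gd t
        (if PySem.Set.contains (PySem.Set.ofList hidden) p.1 && ((gd.get? p.1).getD none).isNone && !(acc.contains p.1)
         then acc ++ [p.1] else acc) ↔ _
    by_cases hb : (PySem.Set.contains (PySem.Set.ofList hidden) p.1
        && ((gd.get? p.1).getD none).isNone && !(acc.contains p.1)) = true
    · rw [if_pos hb, ih]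
      rw [hcs] at hb
      simp only [Bool.and_eq_true, Bool.not_eq_true'] at hb
      obtain ⟨⟨hc1, hc2⟩, hc3⟩ := hb
      simp only [List.mem_append, List.mem_cons, List.map_cons, List.not_mem_nil, or_false]
      constructor
      · rintro ((h | rfl) | h)
        · exact Or.inl h
        · exact Or.inr ⟨Or.inl rfl, hc1, hc2⟩
        · exact Or.inr ⟨Or.inr h.1, h.2⟩
      · rintro (h | ⟨(h | h), h2, h3⟩)
        · exact Or.inl (Or.inl h)
        · exact Or.inl (Or.inr h)
        · exact Or.inr ⟨h, h2, h3⟩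
    · rw [if_neg hb, ih]
      simp only [List.map_cons, List.mem_cons]
      constructor
      · rintro (h | h)
        · exact Or.inl h
        · exact Or.inr ⟨Or.inr h.1, h.2⟩
      · rintro (h | ⟨(rfl | h), h2, h3⟩)
        · exact Or.inl h
        · by_cases hcc : p.1 ∈ acc
          · exact Or.inl hcc
          · exfalso
            apply hb
            rw [hcs]
            simp only [Bool.and_eq_true, Bool.not_eq_true']
            refine ⟨⟨h2, h3⟩, ?_⟩
            cases hc : acc.contains p.1 with
            | false => rfl
            | true => exact absurd (List.contains_iff_mem.1 hc) hcc
        · exact Or.inr ⟨h, h2, h3⟩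

theorem pvGrowFold_mem (gd : PySem.Dict Int (Option Int)) (E : PySem.Dict Int (List (Int × Int)))
    (hidden : List Int) :
    ∀ (l : List Int) (acc : List Int) (x : Int),
    x ∈ l.foldl (fun a v => pvInner (PySem.Set.ofList hidden) gd ((E.get? v).getD []) a) acc ↔
      x ∈ acc ∨ ∃ v ∈ l, x ∈ pvPNOf gd E hidden v := by
  intro l
  induction l with
  | nil => intro acc x; simp
  | cons v t ih =>
    intro acc x
    rw [List.foldl_cons, ih, pvInner_mem]
    simp only [List.mem_cons]
    constructor
    · rintro ((h | h) | ⟨w, hw, hx⟩)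
      · exact Or.inl h
      · exact Or.inr ⟨v, Or.inl rfl, (pvPNOf_mem_iff gd E hidden v x).2 h⟩
      · exact Or.inr ⟨w, Or.inr hw, hx⟩
    · rintro (h | ⟨w, (rfl | hw), hx⟩)
      · exact Or.inl (Or.inl h)
      · exact Or.inl (Or.inr ((pvPNOf_mem_iff gd E hidden w x).1 hx))
      · exact Or.inr ⟨w, hw, hx⟩

theorem pvGrow_toFinset (gd : PySem.Dict Int (Option Int)) (E : PySem.Dict Int (List (Int × Int)))
    (hidden : List Int) (R : List Int) :
    (pvGrowB E (PySem.Set.ofList hidden) gd R).toFinset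
      = pvStep (pvPNOf gd E hidden) R.toFinset := by
  ext x
  rw [List.mem_toFinset]
  show x ∈ R.foldl (fun acc v => pvInner (PySem.Set.ofList hidden) gd ((E.get? v).getD []) acc) R ↔ _
  rw [pvGrowFold_mem]
  simp only [pvStep, Finset.mem_union, Finset.mem_biUnion, List.mem_toFinset]

theorem pvFoldIter {α : Type} (g : α → α) :
    ∀ (l : List Int) (x : α), l.foldl (fun y _ => g y) x = g^[l.length] x := by
  intro l
  induction l with
  | nil => intro x; rfl
  | cons a t ih =>
    intro x
    rw [List.foldl_cons, ih, List.length_cons, Function.iterate_succ_apply]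

theorem pvGrow_iter_toFinset (gd : PySem.Dict Int (Option Int)) (E : PySem.Dict Int (List (Int × Int)))
    (hidden : List Int) (s : Int) :
    ∀ k, ((fun R => pvGrowB E (PySem.Set.ofList hidden) gd R)^[k] [s]).toFinset
      = (pvStep (pvPNOf gd E hidden))^[k] {s} := by
  intro k
  induction k with
  | zero => simp
  | succ k ih =>
    rw [Function.iterate_succ_apply', Function.iterate_succ_apply', pvGrow_toFinset, ih]

-- ---- port B: the relaxation phase ----
theorem pvRelaxPreds_def (E : PySem.Dict Int (List (Int × Int))) (hidden : List Int) (w : Int) :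
    (((E.get? w).getD []).map Prod.fst).filter (fun u => PySem.Set.contains (PySem.Set.ofList hidden) u)
      = pvPredsOf E hidden w := by
  unfold pvPredsOf
  apply List.filter_congr
  intro x _
  simp [pysem]

theorem pvRelax_persist (E : PySem.Dict Int (List (Int × Int))) (hidden : List Int)
    (d : PySem.Dict Int (Option Int)) (w u x : Int)
    (hx : (d.get? u).getD none = some x) :
    ((pvRelax E (PySem.Set.ofList hidden) d w).get? u).getD none = some x := by
  unfold pvRelax
  cases hdw : (d.get? w).getD none with
  | some y => exact hx
  | none =>
    have hne : u ≠ w := by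
      intro h
      rw [h, hdw] at hx
      cases hx
    show ((if _ then d.insert w _ else d).get? u).getD none = some x
    split
    · rw [PySem.Dict.get?_insert, if_neg hne]
      exact hx
    · exact hx

-- when w is still ungraded and all its hidden predecessors are graded, one relaxation
-- step writes exactly the specification value
theorem pvRelax_eq_insert (gd : PySem.Dict Int (Option Int)) (E : PySem.Dict Int (List (Int × Int)))
    (hidden : List Int) (R : Finset Int)
    (hclosed : ∀ v ∈ R, ∀ u ∈ pvPNOf gd E hidden v, u ∈ R)
    (hacyc : ∀ v ∈ R, v ∉ pvAnc (pvPNOf gd E hidden) hidden v)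
    {d : PySem.Dict Int (Option Int)} {w : Int}
    (hinv : pvInv gd E hidden R d) (hwR : w ∈ R)
    (hgw : gd.get? w = some none)
    (hdw : (d.get? w).getD none = none)
    (hall : ∀ u ∈ pvPredsOf E hidden w, ((d.get? u).getD none).isSome) :
    pvRelax E (PySem.Set.ofList hidden) d w = d.insert w (some (pvPV gd E hidden w)) := by
  unfold pvRelax
  cases hdw' : (d.get? w).getD none with
  | some y => rw [hdw'] at hdw; cases hdw
  | none =>
    simp only [pvRelaxPreds_def]
    have hallb : ((pvPredsOf E hidden w).all (fun u => ((d.get? u).getD none).isSome)) = true :=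
      List.all_eq_true.2 (by intro u hu; exact hall u hu)
    rw [if_pos hallb]
    congr 1
    congr 1
    have hmap : (pvPredsOf E hidden w).map (fun u => ((d.get? u).getD none).getD 0)
        = (pvPredsOf E hidden w).map (pvPV gd E hidden) := by
      apply List.map_congr_left
      intro u hu
      obtain ⟨x, hx⟩ := Option.isSome_iff_exists.1 (hall u hu)
      rw [hx]
      have := pvInv_some gd E hidden R hinv hx
      simp [this]
    rw [hmap]
    have hgdw : (gd.get? w).getD none = none := by rw [hgw]; rfl
    rw [pvPV_unfold gd E hidden R hclosed hacyc hwR hgdw]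
    by_cases hps : pvPredsOf E hidden w = []
    · rw [if_pos hps, hps]
      simp [PySem.List.max?]
    · rw [if_neg hps]
      cases hm : PySem.List.max? ((pvPredsOf E hidden w).map (pvPV gd E hidden)) (fun x => x) with
      | none =>
        rw [PySem.List.max?_eq_none_iff] at hm
        exact absurd (List.map_eq_nil_iff.1 hm) hps
      | some m => rfl

theorem pvRelax_inv (gd : PySem.Dict Int (Option Int)) (E : PySem.Dict Int (List (Int × Int)))
    (hidden : List Int) (R : Finset Int)
    (hclosed : ∀ v ∈ R, ∀ u ∈ pvPNOf gd E hidden v, u ∈ R)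
    (hacyc : ∀ v ∈ R, v ∉ pvAnc (pvPNOf gd E hidden) hidden v)
    (hkeys : ∀ u ∈ R, (gd.get? u).isSome)
    {d : PySem.Dict Int (Option Int)} {w : Int}
    (hinv : pvInv gd E hidden R d) (hw : w ∈ R) :
    pvInv gd E hidden R (pvRelax E (PySem.Set.ofList hidden) d w) := by
  cases hdw : (d.get? w).getD none with
  | some y =>
    have : pvRelax E (PySem.Set.ofList hidden) d w = d := by
      unfold pvRelax
      simp only [hdw]
    rw [this]
    exact hinv
  | none =>
    have hgdw : (gd.get? w).getD none = none := pvInv_none gd E hidden R hinv hdw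
    have hgw : gd.get? w = some none := by
      have hsome := hkeys w hw
      cases hq : gd.get? w with
      | none => rw [hq] at hsome; simp at hsome
      | some o =>
        cases o with
        | none => rfl
        | some y => rw [hq] at hgdw; simp at hgdw
    by_cases hall : ∀ u ∈ pvPredsOf E hidden w, ((d.get? u).getD none).isSome
    · rw [pvRelax_eq_insert gd E hidden R hclosed hacyc hinv hw hgw hdw hall]
      exact pvInv_insert' gd E hidden R hinv hgw hw _ rfl
    · have : pvRelax E (PySem.Set.ofList hidden) d w = d := by
        unfold pvRelax
        simp only [hdw]
        simp only [pvRelaxPreds_def]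
        rw [if_neg]
        intro hb
        exact hall (by simpa using List.all_eq_true.1 hb)
      rw [this]
      exact hinv

theorem pvRelax_progress (gd : PySem.Dict Int (Option Int)) (E : PySem.Dict Int (List (Int × Int)))
    (hidden : List Int) (R : Finset Int)
    (hclosed : ∀ v ∈ R, ∀ u ∈ pvPNOf gd E hidden v, u ∈ R)
    (hacyc : ∀ v ∈ R, v ∉ pvAnc (pvPNOf gd E hidden) hidden v)
    (hkeys : ∀ u ∈ R, (gd.get? u).isSome)
    {d : PySem.Dict Int (Option Int)} {w : Int}
    (hinv : pvInv gd E hidden R d) (hw : w ∈ R)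
    (hall : ∀ u ∈ pvPredsOf E hidden w, ((d.get? u).getD none).isSome) :
    ((pvRelax E (PySem.Set.ofList hidden) d w).get? w).getD none = some (pvPV gd E hidden w) := by
  cases hdw : (d.get? w).getD none with
  | some y =>
    have heq : pvRelax E (PySem.Set.ofList hidden) d w = d := by
      unfold pvRelax
      simp only [hdw]
    rw [heq, hdw, pvInv_some gd E hidden R hinv hdw]
  | none =>
    have hgdw : (gd.get? w).getD none = none := pvInv_none gd E hidden R hinv hdw
    have hgw : gd.get? w = some none := by
      have hsome := hkeys w hw
      cases hq : gd.get? w with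
      | none => rw [hq] at hsome; simp at hsome
      | some o =>
        cases o with
        | none => rfl
        | some y => rw [hq] at hgdw; simp at hgdw
    rw [pvRelax_eq_insert gd E hidden R hclosed hacyc hinv hw hgw hdw hall]
    rw [PySem.Dict.get?_insert]
    simp

-- a node already graded / still ungraded w.r.t. rank: "done up to k"
def pvDone (gd : PySem.Dict Int (Option Int)) (E : PySem.Dict Int (List (Int × Int)))
    (hidden : List Int) (R : Finset Int) (k : Nat) (d : PySem.Dict Int (Option Int)) : Prop :=
  ∀ w : Int, (gd.get? w).getD none = none → w ∈ R →
    pvRankN gd E hidden w < k → ((d.get? w).getD none).isSome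

theorem pvRoundFold (gd : PySem.Dict Int (Option Int)) (E : PySem.Dict Int (List (Int × Int)))
    (hidden : List Int) (R : Finset Int)
    (hclosed : ∀ v ∈ R, ∀ u ∈ pvPNOf gd E hidden v, u ∈ R)
    (hacyc : ∀ v ∈ R, v ∉ pvAnc (pvPNOf gd E hidden) hidden v)
    (hkeys : ∀ u ∈ R, (gd.get? u).isSome)
    (k : Nat) :
    ∀ (l : List Int) (d : PySem.Dict Int (Option Int)),
      (∀ w ∈ l, (gd.get? w).getD none = none ∧ w ∈ R) →
      pvInv gd E hidden R d →
      pvDone gd E hidden R k d →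
      pvInv gd E hidden R (l.foldl (pvRelax E (PySem.Set.ofList hidden)) d) ∧
      (∀ u x, (d.get? u).getD none = some x →
        ((l.foldl (pvRelax E (PySem.Set.ofList hidden)) d).get? u).getD none = some x) ∧
      (∀ w ∈ l, pvRankN gd E hidden w ≤ k →
        (((l.foldl (pvRelax E (PySem.Set.ofList hidden)) d).get? w).getD none).isSome) := by
  intro l
  induction l with
  | nil =>
    intro d _ hinv _
    exact ⟨hinv, fun u x hx => hx, by intro w hw; cases hw⟩
  | cons w t ih =>
    intro d hl hinv hdone
    have hwP := hl w (by simp)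
    have hinv1 : pvInv gd E hidden R (pvRelax E (PySem.Set.ofList hidden) d w) :=
      pvRelax_inv gd E hidden R hclosed hacyc hkeys hinv hwP.2
    have hdone1 : pvDone gd E hidden R k (pvRelax E (PySem.Set.ofList hidden) d w) := by
      intro w' h1 h2 h3
      obtain ⟨x, hx⟩ := Option.isSome_iff_exists.1 (hdone w' h1 h2 h3)
      rw [pvRelax_persist E hidden d w w' x hx]
      rfl
    have ihres := ih (pvRelax E (PySem.Set.ofList hidden) d w)
      (fun w' hw' => hl w' (by simp [hw'])) hinv1 hdone1
    refine ⟨ihres.1, ?_, ?_⟩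
    · intro u x hx
      exact ihres.2.1 u x (pvRelax_persist E hidden d w u x hx)
    · intro w' hw' hrk
      rcases List.mem_cons.1 hw' with hw2 | hw2
      · -- w' is the head: its predecessors are all graded in d, so the step grades it
        subst hw2
        have hall : ∀ u ∈ pvPredsOf E hidden w', ((d.get? u).getD none).isSome := by
          intro u hu
          cases hgu : (gd.get? u).getD none with
          | some x =>
            rw [pvInv_computed_of_gd gd E hidden R hinv hgu]
            rfl
          | none =>
            have huN : u ∈ pvPNOf gd E hidden w' := by
              simp only [pvPNOf, List.mem_filter]
              exact ⟨hu, by simp [hgu]⟩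
            have huR : u ∈ R := hclosed w' hwP.2 u huN
            have hlt : pvRankN gd E hidden u < pvRankN gd E hidden w' :=
              pvRankN_lt gd E hidden huN (hacyc u huR)
            exact hdone u hgu huR (by omega)
        have hprog := pvRelax_progress gd E hidden R hclosed hacyc hkeys hinv hwP.2 hall
        rw [List.foldl_cons, ihres.2.1 w' _ hprog]
        rfl
      · exact ihres.2.2 w' hw2 hrk

theorem pvRounds (gd : PySem.Dict Int (Option Int)) (E : PySem.Dict Int (List (Int × Int)))
    (hidden : List Int) (R : Finset Int)
    (hclosed : ∀ v ∈ R, ∀ u ∈ pvPNOf gd E hidden v, u ∈ R)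
    (hacyc : ∀ v ∈ R, v ∉ pvAnc (pvPNOf gd E hidden) hidden v)
    (hkeys : ∀ u ∈ R, (gd.get? u).isSome)
    (todo : List Int)
    (htodo : ∀ w ∈ todo, (gd.get? w).getD none = none ∧ w ∈ R)
    (htodoAll : ∀ w, (gd.get? w).getD none = none → w ∈ R → w ∈ todo) :
    ∀ (L : List Int) (d : PySem.Dict Int (Option Int)) (k : Nat),
      pvInv gd E hidden R d → pvDone gd E hidden R k d →
      pvInv gd E hidden R
        (L.foldl (fun d _ => todo.foldl (pvRelax E (PySem.Set.ofList hidden)) d) d) ∧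
      pvDone gd E hidden R (k + L.length)
        (L.foldl (fun d _ => todo.foldl (pvRelax E (PySem.Set.ofList hidden)) d) d) := by
  intro L
  induction L with
  | nil => intro d k hinv hdone; exact ⟨hinv, hdone⟩
  | cons a L ih =>
    intro d k hinv hdone
    have hround := pvRoundFold gd E hidden R hclosed hacyc hkeys k todo d htodo hinv hdone
    have hdone1 : pvDone gd E hidden R (k+1)
        (todo.foldl (pvRelax E (PySem.Set.ofList hidden)) d) := by
      intro w h1 h2 h3
      by_cases hlt : pvRankN gd E hidden w < k
      · obtain ⟨x, hx⟩ := Option.isSome_iff_exists.1 (hdone w h1 h2 hlt)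
        rw [hround.2.1 w x hx]
        rfl
      · exact hround.2.2 w (htodoAll w h1 h2) (by omega)
    have hih := ih (todo.foldl (pvRelax E (PySem.Set.ofList hidden)) d) (k+1) hround.1 hdone1
    rw [List.foldl_cons]
    have hlen : k + (a :: L).length = (k + 1) + L.length := by simp; omega
    rw [hlen]
    exact hih

theorem pvB_top (self_node : Int) (in_edges_dict : List (Int × List (Int × Int)))
    (grade_dict : List (Int × Option Int)) (hidden : List Int)
    (hself : (PySem.Dict.mk grade_dict).get? self_node = some none)
    (hpre : ∀ v ∈ pvReach (pvPNOf (PySem.Dict.mk grade_dict) (PySem.Dict.mk in_edges_dict) hidden) hidden self_node,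
      ((PySem.Dict.mk grade_dict).get? v).isSome ∧
      ((PySem.Dict.mk in_edges_dict).get? v).isSome ∧
      v ∉ pvAnc (pvPNOf (PySem.Dict.mk grade_dict) (PySem.Dict.mk in_edges_dict) hidden) hidden v) :
    hidden_node_grade_alt self_node in_edges_dict grade_dict hidden
      = pvPV (PySem.Dict.mk grade_dict) (PySem.Dict.mk in_edges_dict) hidden self_node := by
  set gd := PySem.Dict.mk grade_dict with hgd
  set E := PySem.Dict.mk in_edges_dict with hE
  set R := pvReach (pvPNOf gd E hidden) hidden self_node with hR
  have hPmem := pvPN_mem_hidden gd E hidden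
  have hclosed : ∀ v ∈ R, ∀ u ∈ pvPNOf gd E hidden v, u ∈ R := by
    intro v hv u hu
    exact pvReach_closed (pvPNOf gd E hidden) hidden hPmem self_node hv (List.mem_toFinset.2 hu)
  have hacyc : ∀ v ∈ R, v ∉ pvAnc (pvPNOf gd E hidden) hidden v :=
    fun v hv => (hpre v hv).2.2
  have hkeys : ∀ v ∈ R, (gd.get? v).isSome := fun v hv => (hpre v hv).1
  have hselfR : self_node ∈ R := pvSelf_mem_reach _ hidden self_node
  have hflat : (gd.get? self_node).getD none = none := by rw [hself]; rfl
  set relevant := (PySem.List.pyRange 0 ((hidden.length : Int) + 1) 1).foldl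
      (fun Rl _ => pvGrowB E (PySem.Set.ofList hidden) gd Rl) [self_node] with hreldef
  -- the closure phase computes exactly R (as a set)
  have hlen1 : (PySem.List.pyRange 0 ((hidden.length : Int) + 1) 1).length = hidden.length + 1 := by
    have : ((hidden.length : Int) + 1) = ((hidden.length + 1 : Nat) : Int) := by push_cast; ring
    rw [this]
    simp [pysem]
  have hrelset : relevant.toFinset = R := by
    rw [hreldef, pvFoldIter (fun Rl => pvGrowB E (PySem.Set.ofList hidden) gd Rl), hlen1,
      pvGrow_iter_toFinset]
    rfl
  have hrelmem : ∀ x, x ∈ relevant ↔ x ∈ R := by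
    intro x
    rw [← hrelset, List.mem_toFinset]
  -- every member of R is ungraded (it is self_node or a pvPNOf-successor)
  have hRnone : ∀ w ∈ R, (gd.get? w).getD none = none := by
    intro w hw
    rcases pvIter_tag (pvPNOf gd E hidden) (fun x => (gd.get? x).getD none = none)
      (pvPN_none gd E hidden) self_node (hidden.length + 1) w hw with rfl | h
    · exact hflat
    · exact h
  have htodo : ∀ w ∈ relevant, (gd.get? w).getD none = none ∧ w ∈ R := by
    intro w hw
    have hwR := (hrelmem w).1 hw
    exact ⟨hRnone w hwR, hwR⟩
  have htodoAll : ∀ w, (gd.get? w).getD none = none → w ∈ R → w ∈ relevant :=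
    fun w _ hwR => (hrelmem w).2 hwR
  have hselfRel : self_node ∈ relevant := (hrelmem self_node).2 hselfR
  -- the rank of self_node is smaller than the number of collected nodes
  have hacs : self_node ∉ pvAnc (pvPNOf gd E hidden) hidden self_node := hacyc self_node hselfR
  have hrk : pvRankN gd E hidden self_node < relevant.length := by
    have hAncR : pvAnc (pvPNOf gd E hidden) hidden self_node ⊆ R :=
      pvAnc_subset_reach (pvPNOf gd E hidden) hidden hPmem self_node
    have hsub : pvAnc (pvPNOf gd E hidden) hidden self_node
        ⊆ relevant.toFinset.erase self_node := by
      intro u hu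
      rw [Finset.mem_erase, hrelset]
      exact ⟨fun heq => hacs (heq ▸ hu), hAncR hu⟩
    have h1 : pvRankN gd E hidden self_node ≤ (relevant.toFinset.erase self_node).card :=
      Finset.card_le_card hsub
    have h2 : (relevant.toFinset.erase self_node).card = relevant.toFinset.card - 1 :=
      Finset.card_erase_of_mem (List.mem_toFinset.2 hselfRel)
    have h3 : relevant.toFinset.card ≤ relevant.length := List.toFinset_card_le _
    have h4 : 1 ≤ relevant.toFinset.card := Finset.card_pos.2 ⟨self_node, List.mem_toFinset.2 hselfRel⟩
    omega
  have hrounds := pvRounds gd E hidden R hclosed hacyc hkeys relevant htodo htodoAll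
    (PySem.List.pyRange 0 ((relevant.length : Nat) : Int) 1) gd 0
    (pvInv_init gd E hidden R)
    (fun w _ _ h => absurd h (Nat.not_lt_zero _))
  have hlen : (PySem.List.pyRange 0 ((relevant.length : Nat) : Int) 1).length = relevant.length := by
    simp [pysem]
  rw [hlen] at hrounds
  have hdone := hrounds.2 self_node hflat hselfR (by omega)
  obtain ⟨x, hx⟩ := Option.isSome_iff_exists.1 hdone
  have hxval : pvPV gd E hidden self_node = x := pvInv_some gd E hidden R hrounds.1 hx
  simp only [hidden_node_grade_alt]
  rw [← hgd, ← hE]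
  rw [hflat]
  show ((((PySem.List.pyRange 0 ((relevant.length : Int)) 1).foldl
      (fun d _ => relevant.foldl (pvRelax E (PySem.Set.ofList hidden)) d) gd).get? self_node).getD none).getD 0 = _
  rw [hx, hxval]
  rfl

-- ===== VERDICT (by name: the statement is the Claim_ definition above) =====
theorem hidden_node_grade_spec : Claim_equal_hidden_node_grade := by
  intro self_node in_edges_dict grade_dict hidden _ hpre
  unfold Spec_hidden_node_grade
  obtain ⟨h1, h2⟩ := hpre
  cases hq : (PySem.Dict.mk grade_dict).get? self_node with
  | none => rw [hq] at h1; simp at h1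
  | some o =>
    cases o with
    | some x =>
      have hflat : ((PySem.Dict.mk grade_dict).get? self_node).getD none = some x := by
        rw [hq]; rfl
      have hA : hidden_node_grade self_node in_edges_dict grade_dict hidden = x := by
        unfold hidden_node_grade
        simp only [pvACore, hflat]
      have hB : hidden_node_grade_alt self_node in_edges_dict grade_dict hidden = x := by
        simp only [hidden_node_grade_alt, hflat]
      rw [hA, hB]
    | none =>
      rw [pvA_top self_node in_edges_dict grade_dict hidden hq (h2 hq),
          pvB_top self_node in_edges_dict grade_dict hidden hq (h2 hq)]
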